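-- pv_equiv track=rewrite | github.com/permCoding/ege-24-25 | days/2025-02-15 day-02 2/05-20182.py | trio
-- ===== SOURCE A (Python) =====
-- def trio(n):
--     t, sm = '', 0
--     while n > 0:
--         ost = n%3
--         n //= 3
--         t = str(ost) + t
--         sm += ost
--     return t, sm
-- ===== SOURCE B (Python) =====
-- def trio(n):
--     if n <= 0:
--         return '', 0
--     t, sm = trio(n // 3)
--     ost = n % 3
--     return t + str(ost), sm + ost
-- ===== Notes on version B (the rewrite author's own statement) =====
-- stated objective: alternative
-- what changed: Replaced the accumulator while-loop (prepending the low digit each iteration) with structural recursion on n // 3 that computes high digits first and appends the low digit last.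
import Mathlib
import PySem

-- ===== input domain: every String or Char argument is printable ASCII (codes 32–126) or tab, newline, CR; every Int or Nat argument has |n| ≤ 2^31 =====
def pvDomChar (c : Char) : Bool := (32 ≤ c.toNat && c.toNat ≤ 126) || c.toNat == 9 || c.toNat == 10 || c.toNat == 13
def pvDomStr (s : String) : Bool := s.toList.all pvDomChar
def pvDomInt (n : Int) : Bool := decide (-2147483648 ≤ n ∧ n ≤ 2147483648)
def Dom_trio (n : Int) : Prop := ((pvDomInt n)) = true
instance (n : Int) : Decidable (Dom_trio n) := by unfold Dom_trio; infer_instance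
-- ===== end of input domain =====

-- B replaces A's accumulator while-loop with structural recursion on n // 3
-- (high digits first, low digit appended last); same result, an alternative decomposition.

-- ===== PORT A =====
-- the while-loop of A, state (n, t, sm)
def trioLoop (n : Int) (t : String) (sm : Int) : String × Int :=
  if _h : n > 0 then
    trioLoop (PySem.Int.floordiv n 3)
      (PySem.Int.toStr (PySem.Int.mod n 3) ++ t) (sm + PySem.Int.mod n 3)
  else (t, sm)
termination_by n.toNat
decreasing_by
  rw [PySem.Int.floordiv_eq_ediv_of_pos (by omega : (0:Int) < 3)]
  omega

def trio (n : Int) : String × Int := trioLoop n "" 0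

-- ===== PORT B =====
def trio_alt (n : Int) : String × Int :=
  if _h : n ≤ 0 then ("", 0)
  else
    ((trio_alt (PySem.Int.floordiv n 3)).1 ++ PySem.Int.toStr (PySem.Int.mod n 3),
     (trio_alt (PySem.Int.floordiv n 3)).2 + PySem.Int.mod n 3)
termination_by n.toNat
decreasing_by
  rw [PySem.Int.floordiv_eq_ediv_of_pos (by omega : (0:Int) < 3)]
  omega

-- ===== PRECONDITION & SPEC =====
def Spec_trio (n : Int) (out : String × Int) : Prop := out = trio_alt n
instance (n : Int) (out : String × Int) : Decidable (Spec_trio n out) := by unfold Spec_trio; infer_instance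

-- ===== CLAIM (what is proved, stated in full; the proofs are below) =====
def Claim_equal_trio : Prop := ∀ (n : Int), Dom_trio n → Spec_trio n (trio n)

-- ===== LEMMAS AND PROOFS =====
-- loop invariant: A's loop produces B's result with the accumulators spliced on
theorem trioLoop_eq (n : Int) (t : String) (sm : Int) :
    trioLoop n t sm = ((trio_alt n).1 ++ t, (trio_alt n).2 + sm) := by
  induction n, t, sm using trioLoop.induct with
  | case1 n t sm h ih =>
    rw [trioLoop, trio_alt]
    simp only [h, not_le.mpr h, dif_pos, dif_neg, not_false_iff]
    rw [ih]
    refine Prod.ext ?_ ?_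
    · simp [String.append_assoc]
    · simp
      ring
  | case2 n t sm h =>
    rw [trioLoop, trio_alt]
    simp [h, le_of_not_gt h]

-- ===== VERDICT (by name: the statement is the Claim_ definition above) =====
theorem trio_spec : Claim_equal_trio := by
  intro n _
  unfold Spec_trio trio
  rw [trioLoop_eq]
  simp
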